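-- pv_equiv track=rewrite | github.com/diegodh1/solving_problems | even_odd_game.py | even_odd_game
-- ===== SOURCE A (Python) =====
-- def even_odd_game(n, values):
--     turn = True
--     #split the even numbers from the odd numbers
--     odd = []
--     even = []
--     sort_array = sorted(values)
--     for i in range(n):
--         if sort_array[i] % 2 == 0:
--             even.append(sort_array[i])
--         else:
--             odd.append(sort_array[i])
--     turn = True
--     alice = 0
--     bob = 0
--     while len(odd) != 0 or len(even) != 0:
--         if turn:
--             if len(even) == 0:
--                 odd.pop()
--             elif len(odd) == 0 or even[-1] > odd[-1]:
--                 alice += even.pop()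
--             else:
--                 odd.pop()
--             turn = False
--         else:
--             if len(odd) == 0:
--                 even.pop()
--             elif len(even) == 0 or odd[-1] > even[-1]:
--                 bob += odd.pop()
--             else:
--                 even.pop()
--             turn = True
--     if alice == bob:
--         return "Tie"
--
--     return "Alice" if alice > bob else "Bob"
-- ===== SOURCE B (Python) =====
-- def even_odd_game(n, values):
--     # One descending indexed pass over the sorted prefix: the optimal move is
--     # always to take the largest remaining number, so alternate turns down the
--     # first n sorted values; Alice scores evens on her turns, Bob odds on his.
--     pool = sorted(values)
--     alice = 0
--     bob = 0
--     alices_turn = True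
--     for j in range(n - 1, -1, -1):
--         x = pool[j]
--         if alices_turn:
--             if x % 2 == 0:
--                 alice += x
--         elif x % 2 != 0:
--             bob += x
--         alices_turn = not alices_turn
--     if alice == bob:
--         return "Tie"
--     return "Alice" if alice > bob else "Bob"
-- ===== Notes on version B (the rewrite author's own statement) =====
-- stated objective: simpler
-- what changed: Replaced A's even/odd split lists plus a while-loop two-stack merge (popping the larger top each turn) with a single descending indexed pass over the sorted prefix, scoring by turn parity.
import Mathlib
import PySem

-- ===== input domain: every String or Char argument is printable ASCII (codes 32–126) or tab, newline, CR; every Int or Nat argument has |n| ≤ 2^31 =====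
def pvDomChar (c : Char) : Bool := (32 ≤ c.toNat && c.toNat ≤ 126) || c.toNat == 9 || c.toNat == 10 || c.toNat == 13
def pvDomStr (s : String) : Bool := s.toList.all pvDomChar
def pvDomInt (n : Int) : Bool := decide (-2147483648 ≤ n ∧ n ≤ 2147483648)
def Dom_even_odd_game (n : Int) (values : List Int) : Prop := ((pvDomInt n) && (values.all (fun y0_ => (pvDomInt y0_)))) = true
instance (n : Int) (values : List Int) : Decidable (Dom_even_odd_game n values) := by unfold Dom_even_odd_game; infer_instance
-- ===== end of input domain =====

-- B replaces A's even/odd split lists and two-stack merge loop by one descending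
-- indexed pass over the sorted prefix (objective: simpler).

-- ===== PORT A =====
-- the while-loop of A: state (odd, even, turn, alice, bob); pop = read [-1] then dropLast
def evenOddWhile (odd : List Int) (even : List Int) (turn : Bool) (alice : Int) (bob : Int) : Int × Int :=
  if odd.length ≠ 0 ∨ even.length ≠ 0 then
    if turn then
      if even.length = 0 then evenOddWhile odd.dropLast even false alice bob
      else if odd.length = 0 ∨ ((PySem.List.pyGet? even (-1)).getD 0 > (PySem.List.pyGet? odd (-1)).getD 0) then
        evenOddWhile odd even.dropLast false (alice + (PySem.List.pyGet? even (-1)).getD 0) bob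
      else evenOddWhile odd.dropLast even false alice bob
    else
      if odd.length = 0 then evenOddWhile odd even.dropLast true alice bob
      else if even.length = 0 ∨ ((PySem.List.pyGet? odd (-1)).getD 0 > (PySem.List.pyGet? even (-1)).getD 0) then
        evenOddWhile odd.dropLast even true alice (bob + (PySem.List.pyGet? odd (-1)).getD 0)
      else evenOddWhile odd even.dropLast true alice bob
  else (alice, bob)
  termination_by odd.length + even.length
  decreasing_by
  all_goals simp [List.length_dropLast]; omega

def even_odd_game (n : Int) (values : List Int) : String :=
  let sort_array := PySem.List.sorted values (fun x => x) false
  -- for i in range(n): split sort_array[i] into even/odd; none = IndexError (excluded by Pre_)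
  let split := (PySem.List.pyRange 0 n 1).foldl
    (fun (st : Option (List Int × List Int)) i =>
      match st, PySem.List.pyGet? sort_array i with
      | some (odd, even), some x =>
          if PySem.Int.mod x 2 == 0 then some (odd, even ++ [x]) else some (odd ++ [x], even)
      | _, _ => none) (some ([], []))
  match split with
  | none => ""   -- IndexError: outside Pre_
  | some (odd, even) =>
    let r := evenOddWhile odd even true 0 0
    if r.1 == r.2 then "Tie" else if r.1 > r.2 then "Alice" else "Bob"

-- ===== PORT B =====
def even_odd_game_alt (n : Int) (values : List Int) : String :=
  let pool := PySem.List.sorted values (fun x => x) false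
  -- for j in range(n-1, -1, -1): state (alice, bob, alices_turn); none = IndexError (excluded by Pre_)
  let st := (PySem.List.pyRange (n - 1) (-1) (-1)).foldl
    (fun (st : Option (Int × Int × Bool)) j =>
      match st with
      | none => none
      | some (alice, bob, turn) =>
        match PySem.List.pyGet? pool j with
        | none => none
        | some x =>
            some ((if turn && (PySem.Int.mod x 2 == 0) then alice + x else alice),
                  (if !turn && (PySem.Int.mod x 2 != 0) then bob + x else bob),
                  !turn))  (some (0, 0, true))
  match st with
  | none => ""   -- IndexError: outside Pre_
  | some (alice, bob, _) =>
    if alice == bob then "Tie" else if alice > bob then "Alice" else "Bob"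

-- ===== PRECONDITION & SPEC =====
-- A raises IndexError exactly when n > len(values); nothing else is excluded.
def Pre_even_odd_game (n : Int) (values : List Int) : Prop := n ≤ (values.length : Int)
instance (n : Int) (values : List Int) : Decidable (Pre_even_odd_game n values) := by unfold Pre_even_odd_game; infer_instance
def pvWitness_even_odd_game : Int × List Int := (3, [4, 1, 2, 7])

def Spec_even_odd_game (n : Int) (values : List Int) (out : String) : Prop := out = even_odd_game_alt n values
instance (n : Int) (values : List Int) (out : String) : Decidable (Spec_even_odd_game n values out) := by unfold Spec_even_odd_game; infer_instance

-- ===== CLAIM (what is proved, stated in full; the proofs are below) =====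
def Claim_equal_even_odd_game : Prop := ∀ (n : Int) (values : List Int), Dom_even_odd_game n values → Pre_even_odd_game n values → Spec_even_odd_game n values (even_odd_game n values)

-- ===== LEMMAS AND PROOFS =====

-- proof-only model of B's loop body over an explicit value list
def loopB : List Int → Int → Int → Bool → Int × Int × Bool
  | [], a, b, t => (a, b, t)
  | x :: rest, a, b, t =>
      loopB rest (if t && (PySem.Int.mod x 2 == 0) then a + x else a)
                 (if !t && (PySem.Int.mod x 2 != 0) then b + x else b) (!t)

theorem foldA_range (pool : List Int) (k : Nat) (hk : k ≤ pool.length) :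
    (PySem.List.pyRange 0 (k : Int) 1).foldl
      (fun (st : Option (List Int × List Int)) i =>
        match st, PySem.List.pyGet? pool i with
        | some (odd, even), some x =>
            if PySem.Int.mod x 2 == 0 then some (odd, even ++ [x]) else some (odd ++ [x], even)
        | _, _ => none) (some ([], []))
    = some ((pool.take k).filter (fun x => !(PySem.Int.mod x 2 == 0)),
            (pool.take k).filter (fun x => (PySem.Int.mod x 2 == 0))) := by
  induction k with
  | zero => simp [PySem.List.pyRange_one_eq_nil]
  | succ m ih =>
    have hm : m < pool.length := by omega
    have hcast : ((m + 1 : Nat) : Int) = (m : Int) + 1 := by push_cast; ring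
    rw [hcast, PySem.List.pyRange_one_succ_right (by positivity), List.foldl_append]
    rw [ih (by omega)]
    simp only [List.foldl]
    rw [PySem.List.pyGet?_natCast]
    rw [List.getElem?_eq_getElem hm]
    simp only [List.take_add_one, List.getElem?_eq_getElem hm, Option.toList_some, List.filter_append]
    by_cases hp : (2 : Int) ∣ pool[m]
    · have h1 : (pool[m] % 2 == 0) = true := by simp [Int.emod_eq_zero_of_dvd hp]
      simp [h1]
    · have h1 : (pool[m] % 2 == 0) = false := by simp; omega
      simp [h1]

theorem foldB_range (pool : List Int) (k : Nat) (hk : k ≤ pool.length) :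
    ∀ (a b : Int) (t : Bool),
    (PySem.List.pyRange ((k : Int) - 1) (-1) (-1)).foldl
      (fun (st : Option (Int × Int × Bool)) j =>
        match st with
        | none => none
        | some (alice, bob, turn) =>
          match PySem.List.pyGet? pool j with
          | none => none
          | some x =>
              some ((if turn && (PySem.Int.mod x 2 == 0) then alice + x else alice),
                    (if !turn && (PySem.Int.mod x 2 != 0) then bob + x else bob),
                    !turn))  (some (a, b, t))
    = some (loopB ((pool.take k).reverse) a b t) := by
  induction k with
  | zero =>
    intro a b t
    rw [PySem.List.pyRange_neg_one_eq_nil (by omega)]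
    simp [loopB]
  | succ m ih =>
    intro a b t
    have hm : m < pool.length := by omega
    have hcast : ((m + 1 : Nat) : Int) - 1 = (m : Int) := by push_cast; ring
    rw [hcast, PySem.List.pyRange_neg_one_cons (by omega)]
    simp only [List.foldl_cons]
    rw [PySem.List.pyGet?_natCast, List.getElem?_eq_getElem hm]
    show _ = some (loopB ((pool.take (m+1)).reverse) a b t)
    rw [List.take_add_one, List.getElem?_eq_getElem hm]
    simp only [Option.toList_some, List.reverse_append, List.reverse_cons, List.reverse_nil,
      List.nil_append, List.cons_append, loopB]
    exact ih (by omega) _ _ _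

theorem main_merge : ∀ (pool : List Int), pool.Pairwise (· ≤ ·) →
    ∀ (t : Bool) (a b : Int),
      evenOddWhile (pool.filter (fun x => !(PySem.Int.mod x 2 == 0)))
                   (pool.filter (fun x => (PySem.Int.mod x 2 == 0))) t a b
      = ((loopB pool.reverse a b t).1, (loopB pool.reverse a b t).2.1) := by
  intro pool
  induction pool using List.reverseRecOn with
  | nil => intro _ t a b; rw [evenOddWhile]; simp [loopB]
  | append_singleton init m ih =>
    intro hpw t a b
    obtain ⟨hpw1, -, hle⟩ := List.pairwise_append.mp hpw
    have hle' : ∀ e ∈ init, e ≤ m := fun e he => hle e he m (by simp)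
    by_cases hm : (2 : Int) ∣ m
    · -- m even
      have hvm : (PySem.Int.mod m 2 == 0) = true := by
        simp [hm]
      have hfo : (init ++ [m]).filter (fun x => !(PySem.Int.mod x 2 == 0))
          = init.filter (fun x => !(PySem.Int.mod x 2 == 0)) := by
        simp [List.filter_append, hm]
      have hfe : (init ++ [m]).filter (fun x => (PySem.Int.mod x 2 == 0))
          = init.filter (fun x => (PySem.Int.mod x 2 == 0)) ++ [m] := by
        simp [List.filter_append, hm]
      have hwlt : ∀ (h : (init.filter (fun x => !(PySem.Int.mod x 2 == 0))) ≠ []),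
          ((init.filter (fun x => !(PySem.Int.mod x 2 == 0))).getLast h) < m := by
        intro h
        obtain ⟨hmem, hp⟩ := List.mem_filter.mp (List.getLast_mem h)
        have h1 := hle' _ hmem
        have h2 : ¬ (2 : Int) ∣ (init.filter (fun x => !(PySem.Int.mod x 2 == 0))).getLast h := by
          simpa [PySem.Int.mod_eq_zero_iff_dvd] using hp
        omega
      have hC : (List.filter (fun x => !PySem.Int.mod x 2 == 0) init).length = 0 ∨
          (PySem.List.pyGet? (List.filter (fun x => PySem.Int.mod x 2 == 0) init ++ [m]) (-1)).getD 0 >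
          (PySem.List.pyGet? (List.filter (fun x => !PySem.Int.mod x 2 == 0) init) (-1)).getD 0 := by
        by_cases hO : List.filter (fun x => !PySem.Int.mod x 2 == 0) init = []
        · exact Or.inl (by rw [hO]; simp)
        · refine Or.inr ?_
          rw [PySem.List.pyGet?_neg_one_append_singleton, PySem.List.pyGet?_neg_one,
              List.getLast?_eq_some_getLast hO]
          simp only [Option.getD_some]
          exact hwlt hO
      rw [hfo, hfe, evenOddWhile]
      have hrev : (init ++ [m]).reverse = m :: init.reverse := by simp
      rw [hrev]
      cases t with
      | true =>
        simp only [loopB, hvm, Bool.true_and, Bool.not_true, Bool.false_and, if_true]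
        rw [if_pos (Or.inr (by simp))]
        rw [if_neg (by simp), if_pos hC]
        rw [PySem.List.pyGet?_neg_one_append_singleton, List.dropLast_concat]
        simp only [Option.getD_some]
        rw [ih hpw1]
        simp
      | false =>
        simp only [loopB, hvm, Bool.false_and, Bool.not_false, Bool.true_and]
        rw [if_pos (Or.inr (by simp))]
        simp only [Bool.false_eq_true, reduceIte]
        by_cases hO : List.filter (fun x => !PySem.Int.mod x 2 == 0) init = []
        · rw [if_pos (by rw [hO]; rfl), List.dropLast_concat, ih hpw1]
          simp [show ¬ (m % 2 = 1) by omega]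
        · rw [if_neg (fun hlen => hO (List.eq_nil_of_length_eq_zero hlen)), if_neg ?hcond, List.dropLast_concat, ih hpw1]
          simp [show ¬ (m % 2 = 1) by omega]
          case hcond =>
            push Not
            refine ⟨by simp, ?_⟩
            rw [PySem.List.pyGet?_neg_one_append_singleton, PySem.List.pyGet?_neg_one,
                List.getLast?_eq_some_getLast hO]
            simp only [Option.getD_some]
            exact le_of_lt (hwlt hO)
    · -- m odd
      have hvm : (PySem.Int.mod m 2 == 0) = false := by
        simp [hm]
      have hfo : (init ++ [m]).filter (fun x => !(PySem.Int.mod x 2 == 0))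
          = init.filter (fun x => !(PySem.Int.mod x 2 == 0)) ++ [m] := by
        simp [List.filter_append, show m % 2 = 1 by omega]
      have hfe : (init ++ [m]).filter (fun x => (PySem.Int.mod x 2 == 0))
          = init.filter (fun x => (PySem.Int.mod x 2 == 0)) := by
        simp [List.filter_append, show m % 2 = 1 by omega]
      have hwlt : ∀ (h : (init.filter (fun x => (PySem.Int.mod x 2 == 0))) ≠ []),
          ((init.filter (fun x => (PySem.Int.mod x 2 == 0))).getLast h) < m := by
        intro h
        obtain ⟨hmem, hp⟩ := List.mem_filter.mp (List.getLast_mem h)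
        have h1 := hle' _ hmem
        have h2 : (2 : Int) ∣ (init.filter (fun x => (PySem.Int.mod x 2 == 0))).getLast h := by
          simpa [PySem.Int.mod_eq_zero_iff_dvd] using hp
        omega
      rw [hfo, hfe, evenOddWhile]
      have hrev : (init ++ [m]).reverse = m :: init.reverse := by simp
      rw [hrev]
      cases t with
      | true =>
        simp only [loopB, hvm, Bool.true_and, Bool.not_true, Bool.false_and]
        rw [if_pos (Or.inl (by simp))]
        simp only [reduceIte]
        by_cases hE : List.filter (fun x => PySem.Int.mod x 2 == 0) init = []
        · rw [if_pos (by rw [hE]; rfl), List.dropLast_concat, ih hpw1]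
          simp
        · rw [if_neg (fun hlen => hE (List.eq_nil_of_length_eq_zero hlen)), if_neg ?hcond2,
              List.dropLast_concat, ih hpw1]
          · simp
          case hcond2 =>
            push Not
            refine ⟨by simp, ?_⟩
            rw [PySem.List.pyGet?_neg_one_append_singleton, PySem.List.pyGet?_neg_one,
                List.getLast?_eq_some_getLast hE]
            simp only [Option.getD_some]
            exact le_of_lt (hwlt hE)
      | false =>
        simp only [loopB, hvm, Bool.false_and, Bool.not_false, Bool.true_and]
        rw [if_pos (Or.inl (by simp))]
        simp only [Bool.false_eq_true, reduceIte]
        rw [if_neg (by simp)]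
        have hC2 : (List.filter (fun x => PySem.Int.mod x 2 == 0) init).length = 0 ∨
            (PySem.List.pyGet? (List.filter (fun x => !PySem.Int.mod x 2 == 0) init ++ [m]) (-1)).getD 0 >
            (PySem.List.pyGet? (List.filter (fun x => PySem.Int.mod x 2 == 0) init) (-1)).getD 0 := by
          by_cases hE : List.filter (fun x => PySem.Int.mod x 2 == 0) init = []
          · exact Or.inl (by rw [hE]; rfl)
          · refine Or.inr ?_
            rw [PySem.List.pyGet?_neg_one_append_singleton, PySem.List.pyGet?_neg_one,
                List.getLast?_eq_some_getLast hE]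
            simp only [Option.getD_some]
            exact hwlt hE
        rw [if_pos hC2]
        rw [PySem.List.pyGet?_neg_one_append_singleton, List.dropLast_concat]
        simp only [Option.getD_some]
        rw [ih hpw1]
        simp [show m % 2 = 1 by omega]

-- ===== VERDICT (by name: the statement is the Claim_ definition above) =====
theorem even_odd_game_spec : Claim_equal_even_odd_game := by
  unfold Claim_equal_even_odd_game
  intro n values _ hpre
  unfold Pre_even_odd_game at hpre
  unfold Spec_even_odd_game
  simp only [even_odd_game, even_odd_game_alt]
  by_cases hn : n ≤ 0
  · rw [PySem.List.pyRange_one_eq_nil hn, PySem.List.pyRange_neg_one_eq_nil (by omega)]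
    simp only [List.foldl_nil]
    rw [evenOddWhile]
    simp
  · have hk : ((n.toNat : Nat) : Int) = n := Int.toNat_of_nonneg (by omega)
    have hlen : n.toNat ≤ (PySem.List.sorted values (fun x => x) false).length := by
      rw [PySem.List.length_sorted]
      omega
    rw [← hk, foldA_range _ _ hlen, foldB_range _ _ hlen]
    have hpw : ((PySem.List.sorted values (fun x => x) false).take n.toNat).Pairwise (· ≤ ·) := by
      exact (PySem.List.sorted_pairwise (xs := values) (key := fun x => x)).sublist
        (List.take_sublist _ _)
    dsimp only
    rcases hL : loopB ((PySem.List.sorted values (fun x => x) false).take n.toNat).reverse 0 0 true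
      with ⟨a', b', t'⟩
    rw [main_merge _ hpw, hL]
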